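-- pv_equiv track=rewrite | github.com/hc21353/audit-report-qa-agent | src/agents/retriever.py | _extract_sections_for_years
-- ===== SOURCE A (Python) =====
-- def _extract_sections_for_years(db_context: str, years: list) -> str:
--     """
--     graph.py가 빌드한 db_context 문자열에서 관련 연도 섹션만 추출.
--     연도 미지정 시 전체 반환. db_context는 build_db_context()가 생성한
--     h2→h3 올바른 계층 구조를 포함.
--     """
--     if not db_context:
--         return "(DB 구조 정보 없음)"
--     if not years:
--         return db_context
--
--     lines = db_context.split("\n")
--     result = []
--     in_target_year = False
--     header_done = False
--
--     for line in lines: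
--         # 헤더 라인 (## DB 실제 섹션 구조, 적재된 연도 등)은 항상 포함
--         if not header_done and not line.startswith("### "):
--             result.append(line)
--             continue
--
--         # 연도 헤딩 감지
--         if line.startswith("### "):
--             header_done = True
--             try:
--                 year_in_line = int(line.strip("### ").replace("년", "").strip())
--                 in_target_year = year_in_line in years
--             except ValueError:
--                 in_target_year = False
--
--         if in_target_year:
--             result.append(line)
--
--     # 검색 파라미터 가이드는 항상 포함
--     guide_start = False
--     for line in lines:
--         if line.startswith("## 검색 파라미터"):
--             guide_start = True
--         if guide_start:
--             result.append(line)
--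
--     return "\n".join(result) if result else db_context
-- ===== SOURCE B (Python) =====
-- def _span(lines, prefix):
--     i = 0
--     while i < len(lines) and not lines[i].startswith(prefix):
--         i += 1
--     return lines[:i], lines[i:]
--
--
-- def _year_of(line):
--     try:
--         return int(line.strip("### ").replace("\ub144", "").strip())
--     except ValueError:
--         return None
--
--
-- def _groups(rest, years):
--     out = []
--     while rest:
--         h, body = rest[0], rest[1:]
--         sec, rest = _span(body, "### ")
--         y = _year_of(h)
--         if y is not None and y in years:
--             out.append(h)
--             out.extend(sec)
--     return out
--
--
-- def _extract_sections_for_years(db_context: str, years: list) -> str: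
--     if not db_context:
--         return "(DB \uad6c\uc870 \uc815\ubcf4 \uc5c6\uc74c)"
--     if not years:
--         return db_context
--     lines = db_context.split("\n")
--     header, rest = _span(lines, "### ")
--     out = header + _groups(rest, years)
--     tail = lines
--     while tail and not tail[0].startswith("## \uac80\uc0c9 \ud30c\ub77c\ubbf8\ud130"):
--         tail = tail[1:]
--     out += tail
--     return "\n".join(out) if out else db_context
-- ===== Notes on version B (the rewrite author's own statement) =====
-- stated objective: alternative
-- what changed: B replaces A's single stateful line loop (in_target_year/header_done flags) by partitioning the split lines into a leading header block and '### '-headed section groups, keeping whole groups whose parsed year is in years, then appending the tail from the first '## 검색 파라미터' line on.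
import Mathlib
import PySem

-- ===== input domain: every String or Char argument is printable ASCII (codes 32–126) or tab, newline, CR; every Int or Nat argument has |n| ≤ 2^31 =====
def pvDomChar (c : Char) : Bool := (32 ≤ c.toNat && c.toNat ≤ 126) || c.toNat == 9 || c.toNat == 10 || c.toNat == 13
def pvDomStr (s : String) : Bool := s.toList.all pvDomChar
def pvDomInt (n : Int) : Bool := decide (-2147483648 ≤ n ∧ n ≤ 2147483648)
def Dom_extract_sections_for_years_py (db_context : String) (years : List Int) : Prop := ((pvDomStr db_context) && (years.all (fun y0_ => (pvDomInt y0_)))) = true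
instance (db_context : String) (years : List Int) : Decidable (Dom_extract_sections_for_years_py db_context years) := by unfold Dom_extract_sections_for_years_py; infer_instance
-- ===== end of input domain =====

-- B re-structures A's stateful line loop as header-block/section-group partitioning (objective: alternative decomposition, same cost); return value only, no mutation.

-- ===== PORT A =====
-- line.startswith("### ") / line.startswith("## 검색 파라미터"), shared by both ports
def pvIsHeading (l : String) : Bool := PySem.Str.startswith l "### "
def pvIsGuide (l : String) : Bool := PySem.Str.startswith l "## 검색 파라미터"

-- year parsed from a '### ' heading: int(line.strip("### ").replace("년", "").strip()), ValueError → none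
def pvParseYear (line : String) : Option Int :=
  PySem.Int.ofStr? (PySem.Str.strip (PySem.Str.replace (PySem.Str.stripChars line "### ") "년" ""))

-- 'year_in_line in years' with the try/except collapsed to false on ValueError (identical text in A and B)
def pvKeep (years : List Int) (line : String) : Bool :=
  match pvParseYear line with
  | some y => years.contains y
  | none => false

-- body of A's first for-loop, state = (result, in_target_year, header_done)
def pvStepA (years : List Int) (st : List String × Bool × Bool) (line : String) : List String × Bool × Bool :=
  if !st.2.2 && !pvIsHeading line then
    (st.1 ++ [line], st.2.1, st.2.2)
  else
    let in_target := if pvIsHeading line then pvKeep years line else st.2.1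
    let header_done := if pvIsHeading line then true else st.2.2
    if in_target then (st.1 ++ [line], in_target, header_done)
    else (st.1, in_target, header_done)

-- body of A's second for-loop, state = (result, guide_start)
def pvStepGuide (st : List String × Bool) (line : String) : List String × Bool :=
  let guide := if pvIsGuide line then true else st.2
  if guide then (st.1 ++ [line], guide) else (st.1, guide)

def extract_sections_for_years_py (db_context : String) (years : List Int) : String :=
  if db_context = "" then "(DB 구조 정보 없음)"
  else if years = [] then db_context
  else
    let lines := (PySem.Str.split? db_context "\n").getD []
    let st := lines.foldl (pvStepA years) ([], false, false)
    let result := (lines.foldl pvStepGuide (st.1, false)).1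
    if result ≠ [] then PySem.Str.join "\n" result else db_context

-- ===== PORT B =====
-- _groups: repeatedly split off one '### ' section group, keep it iff its year matches
def pvGroups (years : List Int) : List String → List String
  | [] => []
  | h :: rest =>
    let p := rest.span (fun l => !pvIsHeading l)
    (if pvKeep years h then h :: p.1 else []) ++ pvGroups years p.2
termination_by ls => ls.length
decreasing_by
  simp only [List.span_eq_takeWhile_dropWhile]
  exact Nat.lt_succ_of_le (List.length_dropWhile_le _ _)

def extract_sections_for_years_py_alt (db_context : String) (years : List Int) : String :=
  if db_context = "" then "(DB 구조 정보 없음)"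
  else if years = [] then db_context
  else
    let lines := (PySem.Str.split? db_context "\n").getD []
    let p := lines.span (fun l => !pvIsHeading l)
    let tail := lines.dropWhile (fun l => !pvIsGuide l)
    let out := p.1 ++ pvGroups years p.2 ++ tail
    if out ≠ [] then PySem.Str.join "\n" out else db_context

-- ===== PRECONDITION & SPEC =====
def Spec_extract_sections_for_years_py (db_context : String) (years : List Int) (out : String) : Prop := out = extract_sections_for_years_py_alt db_context years
instance (db_context : String) (years : List Int) (out : String) : Decidable (Spec_extract_sections_for_years_py db_context years out) := by unfold Spec_extract_sections_for_years_py; infer_instance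

-- ===== CLAIM (what is proved, stated in full; the proofs are below) =====
def Claim_equal_extract_sections_for_years_py : Prop := ∀ (db_context : String) (years : List Int), Dom_extract_sections_for_years_py db_context years → Spec_extract_sections_for_years_py db_context years (extract_sections_for_years_py db_context years)

-- ===== LEMMAS AND PROOFS =====

lemma pvGroups_nil (years : List Int) : pvGroups years [] = [] := by
  conv_lhs => unfold pvGroups

lemma pvGroups_cons (years : List Int) (h : String) (rest : List String) :
    pvGroups years (h :: rest)
      = (if pvKeep years h then h :: (rest.span (fun l => !pvIsHeading l)).1 else [])
          ++ pvGroups years ((rest.span (fun l => !pvIsHeading l)).2) := by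
  conv_lhs => unfold pvGroups

-- A's first loop after the first heading (header_done = true), recursively
def pvAloop (years : List Int) : List String → Bool → List String
  | [], _ => []
  | l :: ls, t =>
    if pvIsHeading l then
      (if pvKeep years l then [l] else []) ++ pvAloop years ls (pvKeep years l)
    else
      (if t then [l] else []) ++ pvAloop years ls t

lemma guide_loop_true (ls : List String) (res : List String) :
    (ls.foldl pvStepGuide (res, true)).1 = res ++ ls := by
  induction ls generalizing res with
  | nil => simp
  | cons l ls ih =>
    have hstep : pvStepGuide (res, true) l = (res ++ [l], true) := by
      simp [pvStepGuide]
    rw [List.foldl_cons, hstep, ih]; simp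

lemma guide_loop (ls : List String) (res : List String) :
    (ls.foldl pvStepGuide (res, false)).1 = res ++ ls.dropWhile (fun l => !pvIsGuide l) := by
  induction ls generalizing res with
  | nil => simp
  | cons l ls ih =>
    by_cases h : pvIsGuide l
    · have hstep : pvStepGuide (res, false) l = (res ++ [l], true) := by
        simp [pvStepGuide, h]
      rw [List.foldl_cons, hstep, guide_loop_true]
      simp [h]
    · have hstep : pvStepGuide (res, false) l = (res, false) := by
        simp [pvStepGuide, h]
      rw [List.foldl_cons, hstep, ih]
      simp [h]

lemma aloop_foldl (years : List Int) (ls : List String) (res : List String) (t : Bool) :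
    (ls.foldl (pvStepA years) (res, t, true)).1 = res ++ pvAloop years ls t := by
  induction ls generalizing res t with
  | nil => simp [pvAloop]
  | cons l ls ih =>
    have hstep : pvStepA years (res, t, true) l
        = ((if (if pvIsHeading l then pvKeep years l else t) then res ++ [l] else res),
           (if pvIsHeading l then pvKeep years l else t), true) := by
      by_cases h : pvIsHeading l <;> by_cases hk : pvKeep years l <;> by_cases ht : t <;>
        simp [pvStepA, h, hk, ht]
    rw [List.foldl_cons, hstep]
    by_cases h : pvIsHeading l
    · rw [ih, pvAloop]
      by_cases hk : pvKeep years l <;> simp [h, hk]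
    · rw [ih, pvAloop]
      by_cases ht : t <;> simp [h, ht]

lemma aloop_groups (years : List Int) (ls : List String) (t : Bool) :
    pvAloop years ls t
      = (if t then ls.takeWhile (fun l => !pvIsHeading l) else [])
          ++ pvGroups years (ls.dropWhile (fun l => !pvIsHeading l)) := by
  induction ls generalizing t with
  | nil => cases t <;> simp [pvAloop, pvGroups_nil]
  | cons l ls ih =>
    by_cases h : pvIsHeading l
    · rw [pvAloop, if_pos h, ih]
      have hdw : (l :: ls).dropWhile (fun l => !pvIsHeading l) = l :: ls := by
        simp [h]
      have htw : (l :: ls).takeWhile (fun l => !pvIsHeading l) = [] := by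
        simp [h]
      rw [hdw, htw, pvGroups_cons]
      simp only [List.span_eq_takeWhile_dropWhile]
      by_cases hk : pvKeep years l <;> cases t <;> simp [hk]
    · rw [pvAloop, if_neg h, ih]
      have hdw : (l :: ls).dropWhile (fun l => !pvIsHeading l)
          = ls.dropWhile (fun l => !pvIsHeading l) := by
        simp [h]
      have htw : (l :: ls).takeWhile (fun l => !pvIsHeading l)
          = l :: ls.takeWhile (fun l => !pvIsHeading l) := by
        simp [h]
      rw [hdw, htw]
      cases t <;> simp

lemma first_loop (years : List Int) (ls : List String) (res : List String) :
    (ls.foldl (pvStepA years) (res, false, false)).1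
      = res ++ ls.takeWhile (fun l => !pvIsHeading l)
          ++ pvGroups years (ls.dropWhile (fun l => !pvIsHeading l)) := by
  induction ls generalizing res with
  | nil => simp [pvGroups_nil]
  | cons l ls ih =>
    by_cases h : pvIsHeading l
    · simp only [List.foldl_cons, pvStepA, h, Bool.not_true, Bool.and_false,
        Bool.false_eq_true, if_false, if_true]
      have htw : (l :: ls).takeWhile (fun l => !pvIsHeading l) = [] := by
        simp [h]
      have hdw : (l :: ls).dropWhile (fun l => !pvIsHeading l) = l :: ls := by
        simp [h]
      rw [htw, hdw]
      by_cases hk : pvKeep years l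
      · rw [if_pos hk, aloop_foldl, aloop_groups, pvGroups_cons]
        simp only [List.span_eq_takeWhile_dropWhile, hk, if_true]
        simp
      · rw [if_neg hk, aloop_foldl, aloop_groups, pvGroups_cons]
        simp only [List.span_eq_takeWhile_dropWhile, hk, Bool.false_eq_true, if_false]
        simp
    · simp only [List.foldl_cons, pvStepA, h, Bool.not_false, Bool.and_true, if_true]
      have htw : (l :: ls).takeWhile (fun l => !pvIsHeading l)
          = l :: ls.takeWhile (fun l => !pvIsHeading l) := by
        simp [h]
      have hdw : (l :: ls).dropWhile (fun l => !pvIsHeading l)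
          = ls.dropWhile (fun l => !pvIsHeading l) := by
        simp [h]
      rw [htw, hdw, ih]
      simp

-- ===== VERDICT (by name: the statement is the Claim_ definition above) =====
theorem extract_sections_for_years_py_spec : Claim_equal_extract_sections_for_years_py := by
  intro db years _
  unfold Spec_extract_sections_for_years_py extract_sections_for_years_py
    extract_sections_for_years_py_alt
  by_cases h0 : db = ""
  · simp [h0]
  · by_cases h1 : years = []
    · simp [h0, h1]
    · simp only [h0, h1, if_false]
      rw [guide_loop, first_loop]
      simp only [List.span_eq_takeWhile_dropWhile, List.nil_append, List.append_assoc]
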